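-- pv_equiv track=rewrite | github.com/jubin75/KVI | experiments/exp03_retrieval_quality/code/run_exp03_retrieval.py | _hit_rank
-- ===== SOURCE A (Python) =====
-- from typing import Any, Dict, List, Sequence
--
-- def _norm(s: str) -> str:
--     return " ".join(str(s or "").lower().split())
--
-- def _hit_rank(gold_sents: Sequence[str], ranked_texts: Sequence[str]) -> int:
--     if not gold_sents or not ranked_texts:
--         return 0
--     gold_n = [_norm(g) for g in gold_sents if str(g).strip()]
--     if not gold_n:
--         return 0
--     for i, rt in enumerate(ranked_texts, start=1):
--         rn = _norm(rt)
--         if not rn: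
--             continue
--         for g in gold_n:
--             if len(g) >= 8 and g in rn:
--                 return i
--             if len(g) < 8 and g in rn:
--                 return i
--     return 0
-- ===== SOURCE B (Python) =====
-- from typing import Sequence
--
-- def _hit_rank(gold_sents: Sequence[str], ranked_texts: Sequence[str]) -> int:
--     def _nrm(s: str) -> str:
--         return " ".join(str(s or "").lower().split())
--     golds = [_nrm(g) for g in gold_sents if str(g).strip()]
--     if not golds or not ranked_texts:
--         return 0
--     texts = [_nrm(t) for t in ranked_texts]
--     best = None
--     # pattern-major: for each gold pattern find its first hit, answer = min
--     for g in golds: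
--         for i, rn in enumerate(texts):
--             if g in rn:
--                 if best is None or i < best:
--                     best = i
--                 break
--     return 0 if best is None else best + 1
-- ===== Notes on version B (the rewrite author's own statement) =====
-- stated objective: alternative
-- what changed: Replaces A's text-major scan (for each ranked text, test every gold pattern, return on first hit) by a pattern-major scan: each normalized gold pattern independently finds its first hit index over the pre-normalized texts, and the answer is the minimum of these indices, provably equal to A's first-hit rank.
import Mathlib
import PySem

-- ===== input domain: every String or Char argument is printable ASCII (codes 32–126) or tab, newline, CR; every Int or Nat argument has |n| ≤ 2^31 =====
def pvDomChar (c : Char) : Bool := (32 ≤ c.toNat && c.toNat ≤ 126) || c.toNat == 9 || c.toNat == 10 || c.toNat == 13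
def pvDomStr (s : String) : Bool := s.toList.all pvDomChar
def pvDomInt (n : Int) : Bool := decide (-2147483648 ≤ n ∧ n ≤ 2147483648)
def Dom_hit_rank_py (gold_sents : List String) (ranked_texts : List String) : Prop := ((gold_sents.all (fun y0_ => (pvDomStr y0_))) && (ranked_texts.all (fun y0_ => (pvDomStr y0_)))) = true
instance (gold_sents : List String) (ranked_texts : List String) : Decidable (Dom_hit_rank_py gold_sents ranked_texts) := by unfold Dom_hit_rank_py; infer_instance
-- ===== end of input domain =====

-- B replaces A's text-major first-hit scan by a pattern-major scan (first hit index per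
-- gold pattern over pre-normalized texts, answer = minimum); same result, similar cost.

-- ===== PORT A =====
-- _norm(s) = " ".join(str(s or "").lower().split())
def pvNormA (s : String) : String :=
  PySem.Str.join " " (PySem.Str.split₀ (PySem.Str.lower (if s == "" then "" else s)))

-- inner 'for g in gold_n' loop: does any g make the function return here?
def pvAInner (rn : String) : List String → Bool
  | [] => false
  | g :: gs =>
    if decide (8 ≤ PySem.Str.len g) && PySem.Str.isIn g rn then true
    else if decide (PySem.Str.len g < 8) && PySem.Str.isIn g rn then true
    else pvAInner rn gs

-- outer 'for i, rt in enumerate(ranked_texts, start=1)' loop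
def pvALoop (gold_n : List String) : List String → Int → Int
  | [], _ => 0
  | rt :: rest, i =>
    let rn := pvNormA rt
    if rn == "" then pvALoop gold_n rest (i + 1)
    else if pvAInner rn gold_n then i
    else pvALoop gold_n rest (i + 1)

def hit_rank_py (gold_sents : List String) (ranked_texts : List String) : Int :=
  if gold_sents.isEmpty || ranked_texts.isEmpty then 0
  else
    let gold_n := (gold_sents.filter (fun g => PySem.Str.strip g != "")).map pvNormA
    if gold_n.isEmpty then 0
    else pvALoop gold_n ranked_texts 1

-- ===== PORT B =====
def pvNormB (s : String) : String :=
  PySem.Str.join " " (PySem.Str.split₀ (PySem.Str.lower (if s == "" then "" else s)))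

-- 'for i, rn in enumerate(texts): if g in rn: … break' — first hit index of one pattern
def pvFirstIdx (g : String) : List String → Nat → Option Nat
  | [], _ => none
  | rn :: rest, i => if PySem.Str.isIn g rn then some i else pvFirstIdx g rest (i + 1)

def hit_rank_py_alt (gold_sents : List String) (ranked_texts : List String) : Int :=
  let golds := (gold_sents.filter (fun g => PySem.Str.strip g != "")).map pvNormB
  if golds.isEmpty || ranked_texts.isEmpty then 0
  else
    let texts := ranked_texts.map pvNormB
    let best := golds.foldl (fun (best : Option Nat) g =>
      match pvFirstIdx g texts 0 with
      | none => best
      | some i =>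
        match best with
        | none => some i
        | some b => if i < b then some i else best) none
    match best with
    | none => 0
    | some b => (b : Int) + 1

-- ===== PRECONDITION & SPEC =====
def Spec_hit_rank_py (gold_sents : List String) (ranked_texts : List String) (out : Int) : Prop := out = hit_rank_py_alt gold_sents ranked_texts
instance (gold_sents : List String) (ranked_texts : List String) (out : Int) : Decidable (Spec_hit_rank_py gold_sents ranked_texts out) := by unfold Spec_hit_rank_py; infer_instance

-- ===== CLAIM (what is proved, stated in full; the proofs are below) =====
def Claim_equal_hit_rank_py : Prop := ∀ (gold_sents : List String) (ranked_texts : List String), Dom_hit_rank_py gold_sents ranked_texts → Spec_hit_rank_py gold_sents ranked_texts (hit_rank_py gold_sents ranked_texts)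

-- ===== LEMMAS AND PROOFS =====

-- len(g) >= 8 and len(g) < 8 are complementary
lemma pv_decide_len_lt (g : String) :
    decide (PySem.Str.len g < 8) = !decide ((8 : Int) ≤ PySem.Str.len g) := by
  by_cases h : (8 : Int) ≤ PySem.Str.len g
  · rw [decide_eq_false (not_lt.mpr h), decide_eq_true h]; rfl
  · rw [decide_eq_true (not_le.mp h), decide_eq_false h]; rfl

-- the inner A loop is just 'some pattern occurs in rn'
lemma pvAInner_eq_any (rn : String) (G : List String) :
    pvAInner rn G = G.any (fun g => PySem.Str.isIn g rn) := by
  induction G with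
  | nil => rfl
  | cons g gs ih =>
    simp only [pvAInner, List.any_cons, pv_decide_len_lt]
    cases hin : PySem.Str.isIn g rn <;>
      cases h8 : decide ((8 : Int) ≤ PySem.Str.len g) <;> simp [ih]

-- a non-empty pattern never occurs in the empty string
lemma isIn_empty_false (g : String) (hg : g ≠ "") : PySem.Str.isIn g "" = false := by
  have h : ¬ (PySem.Str.isIn g "" = true) := by
    rw [PySem.Str.isIn_iff_infix]
    intro h
    exact hg (String.toList_eq_nil_iff.mp (List.eq_nil_of_infix_nil (by simpa using h)))
  simpa using h

-- A's outer loop computes the first index (offset by the 1-based counter i) at which some pattern occurs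
lemma pvALoop_eq_findIdx (G : List String) (hG : ∀ g ∈ G, g ≠ "") :
    ∀ (ts : List String) (i : Int),
      pvALoop G ts i =
        match ts.findIdx? (fun t => G.any (fun g => PySem.Str.isIn g (pvNormA t))) with
        | none => 0
        | some k => i + (k : Int) := by
  intro ts
  induction ts with
  | nil => intro i; rfl
  | cons t ts ih =>
    intro i
    rw [show pvALoop G (t :: ts) i =
        (if pvNormA t == "" then pvALoop G ts (i + 1)
         else if pvAInner (pvNormA t) G then i else pvALoop G ts (i + 1)) from rfl]
    simp only [List.findIdx?_cons]
    by_cases he : pvNormA t = ""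
    · have hany : (G.any fun g => PySem.Str.isIn g (pvNormA t)) = false := by
        rw [List.any_eq_false]
        intro g hg
        rw [he, isIn_empty_false g (hG g hg)]
        simp
      rw [if_pos (by simp [he]), hany, if_neg (by simp), ih]
      cases h : List.findIdx? (fun t => G.any fun g => PySem.Str.isIn g (pvNormA t)) ts
      · rfl
      · simp only [Option.map_some]; push_cast; ring
    · rw [if_neg (by simp [he]), pvAInner_eq_any]
      cases hany : (G.any fun g => PySem.Str.isIn g (pvNormA t))
      · rw [if_neg (by simp), if_neg (by simp), ih]
        cases h : List.findIdx? (fun t => G.any fun g => PySem.Str.isIn g (pvNormA t)) ts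
        · rfl
        · simp only [Option.map_some]; push_cast; ring
      · rw [if_pos rfl, if_pos rfl]
        norm_num

-- B's per-pattern loop is findIdx? with an offset
lemma pvFirstIdx_eq (g : String) :
    ∀ (ts : List String) (n : Nat),
      pvFirstIdx g ts n = (ts.findIdx? (fun rn => PySem.Str.isIn g rn)).map (n + ·) := by
  intro ts
  induction ts with
  | nil => intro n; rfl
  | cons t ts ih =>
    intro n
    rw [show pvFirstIdx g (t :: ts) n =
        (if PySem.Str.isIn g t then some n else pvFirstIdx g ts (n + 1)) from rfl]
    simp only [List.findIdx?_cons]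
    cases h : PySem.Str.isIn g t
    · rw [if_neg (by simp), if_neg (by simp), ih]
      cases hf : List.findIdx? (fun rn => PySem.Str.isIn g rn) ts
      · rfl
      · simp only [Option.map_some, Option.some.injEq]; omega
    · rw [if_pos rfl, if_pos rfl]
      simp

-- the fold step of B is a minimum on Option Nat
def pvOmin (a b : Option Nat) : Option Nat :=
  match a, b with
  | none, b => b
  | some x, none => some x
  | some x, some y => some (min x y)

lemma pv_step_eq_omin (best h : Option Nat) :
    (match h with
      | none => best
      | some i =>
        match best with
        | none => some i
        | some b => if i < b then some i else best) = pvOmin best h := by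
  cases best with
  | none => cases h <;> rfl
  | some b =>
    cases h with
    | none => rfl
    | some i =>
      show (if i < b then some i else some b) = some (min b i)
      split_ifs with h1 <;> simp <;> omega

lemma pv_foldl_omin_acc_zero {a : Type} (G : List a) (f : a → Option Nat) :
    G.foldl (fun b g => pvOmin b (f g)) (some 0) = some 0 := by
  induction G with
  | nil => rfl
  | cons g gs ih =>
    have h0 : pvOmin (some 0) (f g) = some 0 := by cases h : f g <;> simp [pvOmin]
    rw [List.foldl_cons, h0]; exact ih

lemma pv_foldl_omin_zero_mem {a : Type} (G : List a) (f : a → Option Nat)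
    (h : ∃ g ∈ G, f g = some 0) (acc : Option Nat) :
    G.foldl (fun b g => pvOmin b (f g)) acc = some 0 := by
  induction G generalizing acc with
  | nil => simp at h
  | cons g gs ih =>
    rcases h with ⟨g', hg', hf⟩
    rcases List.mem_cons.mp hg' with hg' | hg'
    · subst hg'
      have h0 : pvOmin acc (f g') = some 0 := by cases acc <;> simp [pvOmin, hf]
      rw [List.foldl_cons, h0]
      exact pv_foldl_omin_acc_zero gs f
    · rw [List.foldl_cons]
      exact ih ⟨g', hg', hf⟩ _

lemma pv_foldl_omin_map_succ {a : Type} (G : List a) (f : a → Option Nat) (acc : Option Nat) :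
    G.foldl (fun b g => pvOmin b ((f g).map (· + 1))) (acc.map (· + 1)) =
      (G.foldl (fun b g => pvOmin b (f g)) acc).map (· + 1) := by
  induction G generalizing acc with
  | nil => rfl
  | cons g gs ih =>
    rw [List.foldl_cons, List.foldl_cons,
      show pvOmin (acc.map (· + 1)) ((f g).map (· + 1)) = (pvOmin acc (f g)).map (· + 1) by
        cases acc <;> cases h : f g <;> simp only [pvOmin, Option.map_none, Option.map_some, Option.some.injEq] <;> omega]
    exact ih _

-- min over patterns of the first hit = first index at which any pattern hits
lemma pv_foldl_omin_eq_findIdx (G : List String) :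
    ∀ ts : List String,
      G.foldl (fun b g => pvOmin b (ts.findIdx? (fun rn => PySem.Str.isIn g rn))) none =
        ts.findIdx? (fun rn => G.any (fun g => PySem.Str.isIn g rn)) := by
  intro ts
  induction ts with
  | nil =>
    simp only [List.findIdx?_nil]
    induction G with
    | nil => rfl
    | cons g gs ih => rw [List.foldl_cons]; exact ih
  | cons t ts ih =>
    simp only [List.findIdx?_cons]
    cases hany : (G.any fun g => PySem.Str.isIn g t)
    · rw [if_neg (by simp)]
      have hG : ∀ g ∈ G, PySem.Str.isIn g t = false := by
        intro g hg
        have h0 := List.any_eq_false.mp hany g hg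
        simpa using h0
      rw [PySem.List.foldl_congr_mem G _
        (fun b g => pvOmin b ((List.findIdx? (fun rn => PySem.Str.isIn g rn) ts).map (fun i => i + 1))) none
        (by
          intro b g hg
          rw [hG g hg]
          simp)]
      rw [show (List.foldl (fun b g => pvOmin b ((List.findIdx? (fun rn => PySem.Str.isIn g rn) ts).map (fun i => i + 1))) none G)
          = (G.foldl (fun b g => pvOmin b (List.findIdx? (fun rn => PySem.Str.isIn g rn) ts)) none).map (fun i => i + 1) from by
        simpa using pv_foldl_omin_map_succ G (fun g => List.findIdx? (fun rn => PySem.Str.isIn g rn) ts) none]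
      rw [ih]
    · rw [if_pos rfl]
      apply pv_foldl_omin_zero_mem
      rcases List.any_eq_true.mp hany with ⟨g, hg, hin⟩
      refine ⟨g, hg, ?_⟩
      rw [if_pos hin]

-- === non-emptiness of the normalization of a string with non-whitespace content ===

lemma pv_go_words : ∀ (s cur : List Char) (acc : List (List Char)), (∀ w ∈ acc, w ≠ []) →
    ∀ w ∈ PySem.Chars.split₀.go s cur acc, w ≠ [] := by
  intro s
  induction s with
  | nil =>
    intro cur acc hacc w hw
    simp only [PySem.Chars.split₀.go] at hw
    split_ifs at hw with hc
    · exact hacc w (List.mem_reverse.mp hw)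
    · rcases List.mem_cons.mp (List.mem_reverse.mp hw) with h | h
      · subst h
        simp only [ne_eq, List.reverse_eq_nil_iff]
        simpa [List.isEmpty_iff] using hc
      · exact hacc w h
  | cons c rest ih =>
    intro cur acc hacc w hw
    simp only [PySem.Chars.split₀.go] at hw
    split_ifs at hw with hs hc
    · exact ih [] acc hacc w hw
    · refine ih [] (cur.reverse :: acc) ?_ w hw
      intro w' hw'
      rcases List.mem_cons.mp hw' with h | h
      · subst h
        simp only [ne_eq, List.reverse_eq_nil_iff]
        simpa [List.isEmpty_iff] using hc
      · exact hacc w' h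
    · exact ih (c :: cur) acc hacc w hw

lemma pv_go_ne_nil : ∀ (s cur : List Char) (acc : List (List Char)),
    ((∃ c ∈ s, PySem.Chars.isspace c = false) ∨ cur ≠ [] ∨ acc ≠ []) →
    PySem.Chars.split₀.go s cur acc ≠ [] := by
  intro s
  induction s with
  | nil =>
    intro cur acc h
    simp only [PySem.Chars.split₀.go]
    rcases h with ⟨c, hc, _⟩ | hcur | hacc
    · simp at hc
    · rw [if_neg (by simpa [List.isEmpty_iff] using hcur)]
      simp
    · split_ifs
      · simp only [ne_eq, List.reverse_eq_nil_iff]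
        exact hacc
      · simp
  | cons c rest ih =>
    intro cur acc h
    simp only [PySem.Chars.split₀.go]
    by_cases hs : PySem.Chars.isspace c = true
    · rw [if_pos hs]
      have h' : (∃ c ∈ rest, PySem.Chars.isspace c = false) ∨ cur ≠ [] ∨ acc ≠ [] := by
        rcases h with ⟨c', hc', hns⟩ | h | h
        · rcases List.mem_cons.mp hc' with h0 | h0
          · subst h0; rw [hs] at hns; cases hns
          · exact Or.inl ⟨c', h0, hns⟩
        · exact Or.inr (Or.inl h)
        · exact Or.inr (Or.inr h)
      by_cases hc : cur.isEmpty
      · rw [if_pos hc]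
        refine ih [] acc ?_
        rcases h' with h0 | h0 | h0
        · exact Or.inl h0
        · exact absurd (List.isEmpty_iff.mp hc) h0
        · exact Or.inr (Or.inr h0)
      · rw [if_neg hc]
        exact ih [] (cur.reverse :: acc) (Or.inr (Or.inr (by simp)))
    · rw [if_neg hs]
      exact ih (c :: cur) acc (Or.inr (Or.inl (by simp)))

lemma pv_split_all_ne (l : List Char) : ∀ w ∈ PySem.Chars.split₀ l, w ≠ [] :=
  pv_go_words l [] [] (by simp)

lemma pv_split_ne_nil (l : List Char) (h : ∃ c ∈ l, PySem.Chars.isspace c = false) :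
    PySem.Chars.split₀ l ≠ [] :=
  pv_go_ne_nil l [] [] (Or.inl h)

lemma pv_join_ne_nil (sep : List Char) (ws : List (List Char)) (hne : ws ≠ [])
    (hw : ∀ w ∈ ws, w ≠ []) : PySem.Chars.join sep ws ≠ [] := by
  match ws with
  | [] => exact absurd rfl hne
  | [w] =>
    rw [PySem.Chars.join_singleton]
    exact hw w (by simp)
  | w :: w' :: rest =>
    rw [PySem.Chars.join_cons_cons]
    simp [hw w (by simp)]

lemma pv_exists_nonspace_of_strip_ne (l : List Char) (h : PySem.Chars.strip l ≠ []) :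
    ∃ c ∈ l, PySem.Chars.isspace c = false := by
  by_contra hA
  push Not at hA
  apply h
  have h1 : PySem.Chars.lstrip l = [] := by
    unfold PySem.Chars.lstrip
    exact List.dropWhile_eq_nil_iff.mpr
      (fun x hx => by have := hA x hx; simpa using this)
  unfold PySem.Chars.strip PySem.Chars.rstrip
  rw [h1]
  rfl

lemma pv_isspace_lowerChar (c : Char) (h : PySem.Chars.isspace c = false) :
    PySem.Chars.isspace (PySem.Chars.lowerChar c) = false := by
  unfold PySem.Chars.lowerChar
  by_cases hu : PySem.Chars.isupper c = true
  · have hb : 65 ≤ c.toNat ∧ c.toNat ≤ 90 := by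
      unfold PySem.Chars.isupper at hu
      simp only [Bool.and_eq_true, decide_eq_true_eq] at hu
      have h1 := UInt32.le_iff_toNat_le.mp (Char.le_def.mp hu.1)
      have h2 := UInt32.le_iff_toNat_le.mp (Char.le_def.mp hu.2)
      have e1 : ('A').val.toNat = 65 := by decide
      have e2 : ('Z').val.toNat = 90 := by decide
      have e3 : c.toNat = c.val.toNat := rfl
      omega
    have h2 : (Char.ofNat (c.toNat + 32)).toNat = c.toNat + 32 := by
      rw [Char.toNat_ofNat, if_pos (Or.inl (by omega : c.toNat + 32 < 55296))]
    rw [if_pos hu]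
    unfold PySem.Chars.isspace
    simp only [h2, Bool.or_eq_false_iff, Bool.and_eq_false_iff, decide_eq_false_iff_not]
    omega
  · rw [if_neg hu]
    exact h

lemma pvNormA_ne_empty (g : String) (hg : (PySem.Str.strip g != "") = true) :
    pvNormA g ≠ "" := by
  have hstrip : PySem.Chars.strip g.toList ≠ [] := by
    intro h0
    have hs0 : PySem.Str.strip g = "" := by
      unfold PySem.Str.strip
      rw [h0]
    simp [hs0] at hg
  obtain ⟨c, hc, hns⟩ := pv_exists_nonspace_of_strip_ne _ hstrip
  have hid : (if g == "" then "" else g) = g := by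
    by_cases h' : g = "" <;> simp [h']
  have hx : pvNormA g =
      String.ofList (PySem.Chars.join [' ']
        (PySem.Chars.split₀ (PySem.Chars.lower g.toList))) := by
    unfold pvNormA
    rw [hid]
    unfold PySem.Str.join PySem.Str.split₀
    simp [List.map_map, Function.comp_def, String.toList_ofList, List.map_id']
  rw [hx]
  intro hEq
  have hlist : PySem.Chars.join [' '] (PySem.Chars.split₀ (PySem.Chars.lower g.toList)) = [] := by
    have h3 := congrArg String.toList hEq
    simpa [String.toList_ofList] using h3
  have hwit : ∃ c' ∈ PySem.Chars.lower g.toList, PySem.Chars.isspace c' = false := by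
    refine ⟨PySem.Chars.lowerChar c, ?_, pv_isspace_lowerChar c hns⟩
    unfold PySem.Chars.lower
    exact List.mem_map.mpr ⟨c, hc, rfl⟩
  exact pv_join_ne_nil _ _ (pv_split_ne_nil _ hwit) (pv_split_all_ne _) hlist

-- ===== VERDICT (by name: the statement is the Claim_ definition above) =====
theorem hit_rank_py_spec : Claim_equal_hit_rank_py := by
  intro gold ranked _dom
  unfold Spec_hit_rank_py hit_rank_py hit_rank_py_alt
  have hnb : pvNormB = pvNormA := rfl
  rw [hnb]
  by_cases hre : ranked.isEmpty
  · simp [hre]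
  · by_cases hgn : ((gold.filter (fun g => PySem.Str.strip g != "")).map pvNormA).isEmpty
    · simp [hgn, hre]
    · have hge : gold.isEmpty = false := by
        cases hg0 : gold.isEmpty
        · rfl
        · rw [List.isEmpty_iff] at hg0
          subst hg0
          simp at hgn
      have hre' : ranked.isEmpty = false := by
        cases h0 : ranked.isEmpty
        · rfl
        · exact absurd h0 hre
      have hgn' : ((gold.filter (fun g => PySem.Str.strip g != "")).map pvNormA).isEmpty = false := by
        cases h0 : ((gold.filter (fun g => PySem.Str.strip g != "")).map pvNormA).isEmpty
        · rfl
        · exact absurd h0 hgn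
      simp only [hge, hre', hgn', Bool.or_self, Bool.false_eq_true, if_false]
      set golds := (gold.filter (fun g => PySem.Str.strip g != "")).map pvNormA with hgolds
      have hne : ∀ g ∈ golds, g ≠ "" := by
        intro g hgmem
        rcases List.mem_map.mp hgmem with ⟨g0, hg0, rfl⟩
        exact pvNormA_ne_empty g0 (List.mem_filter.mp hg0).2
      rw [pvALoop_eq_findIdx golds hne ranked 1]
      rw [PySem.List.foldl_congr_mem golds _
        (fun b g => pvOmin b (List.findIdx? (fun rn => PySem.Str.isIn g rn) (ranked.map pvNormA))) none
        (by
          intro b g _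
          rw [pv_step_eq_omin, pvFirstIdx_eq]
          simp)]
      rw [pv_foldl_omin_eq_findIdx golds (ranked.map pvNormA)]
      rw [List.findIdx?_map]
      have hpred : ((fun rn => golds.any fun g => PySem.Str.isIn g rn) ∘ pvNormA) =
          (fun t => golds.any fun g => PySem.Str.isIn g (pvNormA t)) := rfl
      rw [hpred]
      cases h : List.findIdx? (fun t => golds.any fun g => PySem.Str.isIn g (pvNormA t)) ranked
      · rfl
      · push_cast; ring
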